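-- pv_equiv track=rewrite | github.com/ksankaran/zero-to-ai-agent | part_2_ai_basics/chapter_07_intro_ai_llm/rule_based_vs_ml.py | diagnose_plant_problem_rules
-- ===== SOURCE A (Python) =====
-- def diagnose_plant_problem_rules(symptoms):
--     """
--     Traditional rule-based approach to plant diagnosis.
--     Every decision is explicitly programmed.
--
--     Problems with this approach:
--     - Requires extensive manual rule creation
--     - Can't handle cases not explicitly programmed
--     - Doesn't improve with experience
--     - Misses subtle pattern combinations
--     """
--     # Convert symptoms to lowercase for comparison
--     symptoms_lower = [s.lower() for s in symptoms]
--
--     # Explicitly programmed decision tree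
--     if "yellow_leaves" in symptoms_lower:
--         if "brown_tips" in symptoms_lower:
--             return "Overwatering - reduce watering frequency"
--         elif "pale_green" in symptoms_lower:
--             return "Iron deficiency - add iron supplement"
--         else:
--             return "Nitrogen deficiency - add fertilizer"
--
--     elif "brown_spots" in symptoms_lower:
--         if "fuzzy_growth" in symptoms_lower:
--             return "Fungal infection - apply fungicide"
--         else:
--             return "Bacterial infection - remove affected leaves"
--
--     elif "wilting" in symptoms_lower:
--         if "dry_soil" in symptoms_lower:
--             return "Underwatering - increase water"
--         else:
--             return "Root rot - check drainage"
--
--     elif "holes_in_leaves" in symptoms_lower: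
--         return "Pest damage - inspect for insects"
--
--     else:
--         return "Unknown problem - consult expert"
-- ===== SOURCE B (Python) =====
-- # B: data-driven rule table (ordered specific-before-general) scanned once for the
-- # first rule whose required-symptom set is contained in the lowercased symptom set.
--
-- _RULES = [
--     ({"yellow_leaves", "brown_tips"}, "Overwatering - reduce watering frequency"),
--     ({"yellow_leaves", "pale_green"}, "Iron deficiency - add iron supplement"),
--     ({"yellow_leaves"}, "Nitrogen deficiency - add fertilizer"),
--     ({"brown_spots", "fuzzy_growth"}, "Fungal infection - apply fungicide"),
--     ({"brown_spots"}, "Bacterial infection - remove affected leaves"),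
--     ({"wilting", "dry_soil"}, "Underwatering - increase water"),
--     ({"wilting"}, "Root rot - check drainage"),
--     ({"holes_in_leaves"}, "Pest damage - inspect for insects"),
-- ]
--
--
-- def diagnose_plant_problem_rules(symptoms):
--     present = {s.lower() for s in symptoms}
--     for required, diagnosis in _RULES:
--         if required <= present:
--             return diagnosis
--     return "Unknown problem - consult expert"
-- ===== Notes on version B (the rewrite author's own statement) =====
-- stated objective: idiomatic
-- what changed: Replaced the nested if/elif decision tree with a declarative ordered rule table of (required-symptom-set, diagnosis) pairs scanned for the first subset match against the lowercased symptom set.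
import Mathlib
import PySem

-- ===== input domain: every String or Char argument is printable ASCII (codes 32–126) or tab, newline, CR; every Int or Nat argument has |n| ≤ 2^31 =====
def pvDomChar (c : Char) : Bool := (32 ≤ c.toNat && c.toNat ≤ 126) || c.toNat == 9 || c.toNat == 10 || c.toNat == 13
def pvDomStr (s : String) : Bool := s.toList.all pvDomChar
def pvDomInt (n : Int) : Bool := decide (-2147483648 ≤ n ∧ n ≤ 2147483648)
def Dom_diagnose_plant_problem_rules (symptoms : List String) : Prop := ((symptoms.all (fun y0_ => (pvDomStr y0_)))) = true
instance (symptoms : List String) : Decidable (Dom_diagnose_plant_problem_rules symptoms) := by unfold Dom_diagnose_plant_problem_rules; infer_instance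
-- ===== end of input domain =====

-- B replaces A's nested if/elif tree with an ordered declarative rule table scanned for the first subset match (idiomatic, same cost).


-- ===== PORT A =====
-- Port of A: nested if/elif tree over membership in the lowercased symptom list.
def diagnose_plant_problem_rules (symptoms : List String) : String :=
  let sl := symptoms.map (fun s => PySem.Str.lower s)
  if sl.contains "yellow_leaves" then
    if sl.contains "brown_tips" then "Overwatering - reduce watering frequency"
    else if sl.contains "pale_green" then "Iron deficiency - add iron supplement"
    else "Nitrogen deficiency - add fertilizer"
  else if sl.contains "brown_spots" then
    if sl.contains "fuzzy_growth" then "Fungal infection - apply fungicide"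
    else "Bacterial infection - remove affected leaves"
  else if sl.contains "wilting" then
    if sl.contains "dry_soil" then "Underwatering - increase water"
    else "Root rot - check drainage"
  else if sl.contains "holes_in_leaves" then "Pest damage - inspect for insects"
  else "Unknown problem - consult expert"

-- ===== PORT B =====
-- B: ordered rule table, first rule whose required set is a subset of the symptom set.
def pvRules : List (List String × String) := [
  (["yellow_leaves", "brown_tips"], "Overwatering - reduce watering frequency"),
  (["yellow_leaves", "pale_green"], "Iron deficiency - add iron supplement"),
  (["yellow_leaves"], "Nitrogen deficiency - add fertilizer"),
  (["brown_spots", "fuzzy_growth"], "Fungal infection - apply fungicide"),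
  (["brown_spots"], "Bacterial infection - remove affected leaves"),
  (["wilting", "dry_soil"], "Underwatering - increase water"),
  (["wilting"], "Root rot - check drainage"),
  (["holes_in_leaves"], "Pest damage - inspect for insects")]

def diagnose_plant_problem_rules_alt (symptoms : List String) : String :=
  let present : PySem.Set String := PySem.Set.ofList (symptoms.map (fun s => PySem.Str.lower s))
  match pvRules.find? (fun r => PySem.Set.issubset r.1 present) with
  | some r => r.2
  | none => "Unknown problem - consult expert"

-- ===== PRECONDITION & SPEC =====
def Spec_diagnose_plant_problem_rules (symptoms : List String) (out : String) : Prop := out = diagnose_plant_problem_rules_alt symptoms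
instance (symptoms : List String) (out : String) : Decidable (Spec_diagnose_plant_problem_rules symptoms out) := by unfold Spec_diagnose_plant_problem_rules; infer_instance

-- ===== CLAIM (what is proved, stated in full; the proofs are below) =====
def Claim_equal_diagnose_plant_problem_rules : Prop := ∀ (symptoms : List String), Dom_diagnose_plant_problem_rules symptoms → Spec_diagnose_plant_problem_rules symptoms (diagnose_plant_problem_rules symptoms)

-- ===== LEMMAS AND PROOFS =====

lemma key (sl : List String) :
    (match pvRules.find? (fun r => PySem.Set.issubset r.1 (PySem.Set.ofList sl)) with
      | some r => r.2
      | none => "Unknown problem - consult expert") =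
    (if sl.contains "yellow_leaves" then
      if sl.contains "brown_tips" then "Overwatering - reduce watering frequency"
      else if sl.contains "pale_green" then "Iron deficiency - add iron supplement"
      else "Nitrogen deficiency - add fertilizer"
    else if sl.contains "brown_spots" then
      if sl.contains "fuzzy_growth" then "Fungal infection - apply fungicide"
      else "Bacterial infection - remove affected leaves"
    else if sl.contains "wilting" then
      if sl.contains "dry_soil" then "Underwatering - increase water"
      else "Root rot - check drainage"
    else if sl.contains "holes_in_leaves" then "Pest damage - inspect for insects"
    else "Unknown problem - consult expert") := by
  simp only [pvRules, List.find?, PySem.Set.issubset, List.all_cons, List.all_nil,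
    PySem.Set.contains_eq_listContains, Bool.and_true]
  by_cases h1 : "yellow_leaves" ∈ sl
  · by_cases h2 : "brown_tips" ∈ sl
    · simp_all [PySem.Set.mem_ofList]
    · by_cases h3 : "pale_green" ∈ sl <;> simp_all [PySem.Set.mem_ofList]
  · by_cases h4 : "brown_spots" ∈ sl
    · by_cases h5 : "fuzzy_growth" ∈ sl <;> simp_all [PySem.Set.mem_ofList]
    · by_cases h6 : "wilting" ∈ sl
      · by_cases h7 : "dry_soil" ∈ sl <;> simp_all [PySem.Set.mem_ofList]
      · by_cases h8 : "holes_in_leaves" ∈ sl <;> simp_all [PySem.Set.mem_ofList]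

-- ===== VERDICT (by name: the statement is the Claim_ definition above) =====
theorem diagnose_plant_problem_rules_spec : Claim_equal_diagnose_plant_problem_rules := by
  intro symptoms _
  unfold Spec_diagnose_plant_problem_rules diagnose_plant_problem_rules diagnose_plant_problem_rules_alt
  exact (key (symptoms.map (fun s => PySem.Str.lower s))).symm
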